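-- pv_equiv track=rewrite | github.com/Vaquum/Agent1 | tests/operations/run.py | _extract_markdown_sections
-- ===== SOURCE A (Python) =====
-- def _extract_markdown_sections(markdown_text: str) -> dict[str, str]:
--
--     '''
--     Create markdown section map keyed by second-level heading line.
--
--     Args:
--     markdown_text (str): Markdown payload to parse.
--
--     Returns:
--     dict[str, str]: Heading to section-content mapping.
--     '''
--
--     section_map: dict[str, list[str]] = {}
--     current_heading: str | None = None
--     for line in markdown_text.splitlines():
--         if line.startswith('## '):
--             current_heading = line.strip()
--             section_map[current_heading] = []
--             continue
--
--         if current_heading is not None: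
--             section_map[current_heading].append(line)
--
--     return {
--         heading: '\n'.join(content_lines).strip()
--         for heading, content_lines in section_map.items()
--     }
-- ===== SOURCE B (Python) =====
-- def _extract_markdown_sections(markdown_text: str) -> dict[str, str]:
--     '''Section-splitting re-implementation: find each level-2 heading, grab the
--     block of lines up to the next heading, join and strip it in one go.'''
--     lines = markdown_text.splitlines()
--     n = len(lines)
--     result: dict[str, str] = {}
--     i = 0
--     while i < n:
--         line = lines[i]
--         i += 1
--         if line.startswith('## '):
--             j = i
--             while j < n and not lines[j].startswith('## '):
--                 j += 1
--             result[line.strip()] = '\n'.join(lines[i:j]).strip()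
--             i = j
--     return result
-- ===== Notes on version B (the rewrite author's own statement) =====
-- stated objective: alternative
-- what changed: Replaces A's line-by-line state machine (current-heading option plus per-line dict appends, then a second stringify pass over the dict) with a single section-splitting scan: at each level-2 heading take the whole block of lines up to the next heading, join/strip it once and assign it directly, no intermediate dict of line lists.
import Mathlib
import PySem

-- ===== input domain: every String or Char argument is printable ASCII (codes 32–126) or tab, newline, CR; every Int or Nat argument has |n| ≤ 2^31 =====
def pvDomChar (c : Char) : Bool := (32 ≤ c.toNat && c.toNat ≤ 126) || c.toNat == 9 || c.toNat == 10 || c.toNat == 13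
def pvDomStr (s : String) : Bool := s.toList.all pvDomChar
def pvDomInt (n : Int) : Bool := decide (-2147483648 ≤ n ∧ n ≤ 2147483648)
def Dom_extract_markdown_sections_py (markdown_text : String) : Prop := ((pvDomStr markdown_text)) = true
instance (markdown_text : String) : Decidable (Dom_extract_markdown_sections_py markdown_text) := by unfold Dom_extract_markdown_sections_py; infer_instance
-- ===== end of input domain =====

-- B re-splits the text into heading-delimited sections in one scan instead of A's
-- per-line current-heading state machine with a dict of line lists; same cost, plainer shape.
-- ===== PORT A =====
def pvIsHeading (l : String) : Bool := PySem.Str.startswith l "## "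

def pvAStep (st : PySem.Dict String (List String) × Option String) (line : String) :
    PySem.Dict String (List String) × Option String :=
  if pvIsHeading line then
    let h := PySem.Str.strip line
    (st.1.insert h [], some h)
  else
    match st.2 with
    | none => st
    | some h => (st.1.modify h [] (fun ls => ls ++ [line]), some h)

def extract_markdown_sections_py (markdown_text : String) : List (String × String) :=
  (((PySem.Str.splitlines markdown_text).foldl pvAStep (PySem.Dict.empty, none)).1).items.map
    (fun p => (p.1, PySem.Str.strip (PySem.Str.join "\n" p.2)))

-- ===== PORT B =====
-- Source B's outer while loop consumes one line; on a level-2 heading the inner while scan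
-- (j advancing over non-heading lines) is the takeWhile/dropWhile split of the rest.
def pvBGo (lines : List String) (d : PySem.Dict String String) : PySem.Dict String String :=
  match lines with
  | [] => d
  | l :: rest =>
    if pvIsHeading l then
      let body := rest.takeWhile (fun x => !pvIsHeading x)
      let rest' := rest.dropWhile (fun x => !pvIsHeading x)
      pvBGo rest' (d.insert (PySem.Str.strip l)
        (PySem.Str.strip (PySem.Str.join "\n" body)))
    else pvBGo rest d
termination_by lines.length
decreasing_by
  · exact Nat.lt_succ_of_le (List.length_dropWhile_le _ _)
  · simp

def extract_markdown_sections_py_alt (markdown_text : String) : List (String × String) :=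
  (pvBGo (PySem.Str.splitlines markdown_text) PySem.Dict.empty).items

-- ===== PRECONDITION & SPEC =====
def Spec_extract_markdown_sections_py (markdown_text : String) (out : List (String × String)) : Prop := out = extract_markdown_sections_py_alt markdown_text
instance (markdown_text : String) (out : List (String × String)) : Decidable (Spec_extract_markdown_sections_py markdown_text out) := by unfold Spec_extract_markdown_sections_py; infer_instance

-- ===== CLAIM (what is proved, stated in full; the proofs are below) =====
def Claim_equal_extract_markdown_sections_py : Prop := ∀ (markdown_text : String), Dom_extract_markdown_sections_py markdown_text → Spec_extract_markdown_sections_py markdown_text (extract_markdown_sections_py markdown_text)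

-- ===== LEMMAS AND PROOFS =====

-- A's dict-of-line-lists built by the same section-splitting recursion as pvBGo.
def pvAGo (lines : List String) (m : PySem.Dict String (List String)) :
    PySem.Dict String (List String) :=
  match lines with
  | [] => m
  | l :: rest =>
    if pvIsHeading l then
      pvAGo (rest.dropWhile (fun x => !pvIsHeading x))
        (m.insert (PySem.Str.strip l) (rest.takeWhile (fun x => !pvIsHeading x)))
    else pvAGo rest m
termination_by lines.length
decreasing_by
  · exact Nat.lt_succ_of_le (List.length_dropWhile_le _ _)
  · simp

theorem pv_modify_insert (d : PySem.Dict String (List String)) (k : String)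
    (v : List String) (f : List String → List String) :
    (d.insert k v).modify k [] f = d.insert k (f v) := by
  simp [PySem.Dict.modify, PySem.Dict.getD_insert_self, PySem.Dict.insert_insert_self]

-- the appending phase: while no heading is seen, A appends each line to the entry at h
theorem pv_foldl_body (lines : List String) (m : PySem.Dict String (List String))
    (h : String) (vs : List String) (hall : ∀ l ∈ lines, pvIsHeading l = false) :
    lines.foldl pvAStep (m.insert h vs, some h) = (m.insert h (vs ++ lines), some h) := by
  induction lines generalizing vs with
  | nil => simp
  | cons l ls ih =>
    have hl : pvIsHeading l = false := hall l (by simp)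
    simp only [List.foldl_cons, pvAStep, hl, Bool.false_eq_true, if_false]
    rw [pv_modify_insert, ih _ (fun x hx => hall x (by simp [hx]))]
    simp

-- A's fold equals the section-splitting recursion on the dict of line lists
theorem pv_foldl_eq_aGo (lines : List String) (m : PySem.Dict String (List String)) :
    (lines.foldl pvAStep (m, none)).1 = pvAGo lines m := by
  induction hn : lines.length using Nat.strong_induction_on generalizing lines m with
  | _ n ih =>
  match lines with
  | [] => simp [pvAGo]
  | l :: rest =>
    by_cases hl : pvIsHeading l = true
    · rw [pvAGo]
      simp only [hl, if_true]
      have hsplit : rest = rest.takeWhile (fun x => !pvIsHeading x) ++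
          rest.dropWhile (fun x => !pvIsHeading x) := (List.takeWhile_append_dropWhile).symm
      simp only [List.foldl_cons, pvAStep, hl, if_true]
      conv_lhs => rw [hsplit]
      rw [List.foldl_append]
      rw [pv_foldl_body _ _ _ _ (fun x hx => by
        have := List.mem_takeWhile_imp hx; simpa using this)]
      simp only [List.nil_append]
      -- fold over the dropWhile remainder: its head (if any) is a heading, so the
      -- current-heading component is irrelevant for the first step
      cases hrest : rest.dropWhile (fun x => !pvIsHeading x) with
      | nil => simp [pvAGo]
      | cons r rs =>
        have hr : pvIsHeading r = true := by
          have := List.head_dropWhile_not (fun x => !pvIsHeading x) (by rw [hrest]; simp)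
          simpa [hrest] using this
        have hlen : (r :: rs).length ≤ rest.length := by
          rw [← hrest]; exact List.length_dropWhile_le _ _
        have hswap : (r :: rs).foldl pvAStep
            ((m.insert (PySem.Str.strip l) (rest.takeWhile (fun x => !pvIsHeading x))),
              some (PySem.Str.strip l)) =
            (r :: rs).foldl pvAStep
            ((m.insert (PySem.Str.strip l) (rest.takeWhile (fun x => !pvIsHeading x))),
              none) := by
          simp [List.foldl_cons, pvAStep, hr]
        rw [hswap, ih (r :: rs).length (by rw [← hn]; simpa using Nat.lt_succ_of_le hlen) _ _ rfl]
    · rw [pvAGo]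
      simp only [hl, Bool.false_eq_true, if_false]
      simp only [List.foldl_cons, pvAStep, hl, Bool.false_eq_true, if_false]
      exact ih rest.length (by rw [← hn]; simp) _ _ rfl

-- stringifying commutes with the two parallel recursions
theorem pv_aGo_bGo (lines : List String) (D : PySem.Dict String (List String))
    (d : PySem.Dict String String)
    (hrel : d.items = D.items.map (fun p => (p.1, PySem.Str.strip (PySem.Str.join "\n" p.2)))) :
    (pvBGo lines d).items =
      (pvAGo lines D).items.map (fun p => (p.1, PySem.Str.strip (PySem.Str.join "\n" p.2))) := by
  induction hn : lines.length using Nat.strong_induction_on generalizing lines D d with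
  | _ n ih =>
  match lines with
  | [] => rw [pvBGo, pvAGo]; exact hrel
  | l :: rest =>
    by_cases hl : pvIsHeading l = true
    · rw [pvBGo, pvAGo]
      simp only [hl, if_true]
      refine ih (rest.dropWhile (fun x => !pvIsHeading x)).length
        (by rw [← hn]; simpa using Nat.lt_succ_of_le (List.length_dropWhile_le _ _)) _ _ _ ?_ rfl
      -- the inserted dicts stay related: keys agree, so contains agrees, and both
      -- branches of items_insert commute with the value map
      have hkeys : PySem.Dict.contains d (PySem.Str.strip l) =
          PySem.Dict.contains D (PySem.Str.strip l) := by
        simp [PySem.Dict.contains_eq_decide_mem_keys, PySem.Dict.keys, hrel]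
      by_cases hc : PySem.Dict.contains D (PySem.Str.strip l) = true
      · rw [PySem.Dict.items_insert_of_contains _ _ (by rw [hkeys]; exact hc),
            PySem.Dict.items_insert_of_contains _ _ hc, hrel, List.map_map, List.map_map]
        refine List.map_congr_left (fun p _ => ?_)
        by_cases hp : p.1 = PySem.Str.strip l <;> simp [hp]
      · rw [PySem.Dict.items_insert_of_not_contains _ _ (by rw [hkeys]; simpa using hc),
            PySem.Dict.items_insert_of_not_contains _ _ (by simpa using hc), hrel]
        simp
    · rw [pvBGo, pvAGo]
      simp only [hl, Bool.false_eq_true, if_false]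
      exact ih rest.length (by rw [← hn]; simp) _ _ _ hrel rfl

-- ===== VERDICT (by name: the statement is the Claim_ definition above) =====
theorem extract_markdown_sections_py_spec : Claim_equal_extract_markdown_sections_py := by
  intro t _
  unfold Spec_extract_markdown_sections_py extract_markdown_sections_py
    extract_markdown_sections_py_alt
  rw [pv_foldl_eq_aGo, pv_aGo_bGo _ PySem.Dict.empty PySem.Dict.empty (by
    simp [PySem.Dict.empty])]
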